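-- pv_equiv track=rewrite | github.com/danuaemx/oeis_repo | factor_ge_n_factor/count_le_n.py | find_multiset
-- ===== SOURCE A (Python) =====
-- from functools import lru_cache
--
-- def find_multiset(n, k, factors):
--     """
--     Try to find exactly k factors (all ≥ k) whose product is n.
--     Returns one valid list of factors if possible, else None.
--     """
--     @lru_cache(None)
--     def helper(remaining, depth):
--         # If we've picked k factors, remaining must be 1
--         if depth == k:
--             return [] if remaining == 1 else None
--         # Prune: smallest possible product of the rest is k^(k-depth)
--         if remaining < k ** (k - depth):
--             return None
--         for a in factors.get(remaining, []):
--             if a < k: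
--                 continue
--             if remaining % a != 0:
--                 continue
--             rest = helper(remaining // a, depth + 1)
--             if rest is not None:
--                 return [a] + rest
--         return None
--
--     return helper(n, 0)
-- ===== SOURCE B (Python) =====
-- def find_multiset(n, k, factors):
--     """
--     Try to find exactly k factors (all >= k) whose product is n.
--     Iterative depth-first search with an explicit stack of frames
--     (remaining, depth, path); no recursion, no cache.
--     """
--     stack = [(n, 0, [])]
--     while stack:
--         remaining, depth, path = stack.pop()
--         if depth == k:
--             if remaining == 1:
--                 return path
--             continue
--         if remaining < k ** (k - depth):
--             continue
--         for a in reversed(factors.get(remaining, [])):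
--             if a >= k and remaining % a == 0:
--                 stack.append((remaining // a, depth + 1, path + [a]))
--     return None
-- ===== Notes on version B (the rewrite author's own statement) =====
-- stated objective: alternative
-- what changed: Replaced the lru_cache-memoized recursive DFS by an explicit iterative stack-based DFS over frames (remaining, depth, path) with no recursion and no cache, pushing eligible divisors in reverse so the leftmost branch is explored first.
-- outside the precondition, e.g. on find_multiset(6, -1, {}): A returns None, B returns None
import Mathlib
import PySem

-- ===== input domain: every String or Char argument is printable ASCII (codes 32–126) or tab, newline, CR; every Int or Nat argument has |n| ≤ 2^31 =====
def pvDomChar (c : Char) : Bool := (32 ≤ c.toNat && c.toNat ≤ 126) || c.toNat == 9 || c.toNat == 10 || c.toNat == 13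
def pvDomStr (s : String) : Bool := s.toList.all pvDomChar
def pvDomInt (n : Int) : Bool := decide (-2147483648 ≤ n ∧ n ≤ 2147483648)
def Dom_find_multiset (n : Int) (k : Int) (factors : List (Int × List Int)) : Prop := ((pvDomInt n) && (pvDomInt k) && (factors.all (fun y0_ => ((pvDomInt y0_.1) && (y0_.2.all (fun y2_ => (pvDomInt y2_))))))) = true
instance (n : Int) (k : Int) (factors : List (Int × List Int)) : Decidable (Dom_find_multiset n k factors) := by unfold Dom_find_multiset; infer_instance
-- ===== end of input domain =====

-- B replaces A's lru_cache-memoized recursive DFS by an explicit iterative stack-based DFS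
-- (frames (remaining, depth, path), eligible divisors pushed in reverse); objective: alternative, no speed claim.

-- ===== PORT A =====
-- A's helper(remaining, depth) is ported literally with its depth parameter; a Nat fuel
-- (= (k - depth).toNat at every call, so it never runs out on the admitted domain k ≥ 0,
--  where depth runs 0..k) is added only to justify termination; the fuel-exhausted branch
-- returns none and is unreachable for k ≥ 0. The prune exponent k ** (k - depth) is
-- k ^ (k - depth).toNat, exact since k - depth ≥ 0 there. The lru_cache only memoizes a
-- pure function and cannot change the returned value, so it is dropped in the port.
mutual
  def findA_helper (k : Int) (factors : List (Int × List Int)) (fuel : Nat) (remaining : Int) (depth : Int) : Option (List Int) :=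
    if depth = k then (if remaining = 1 then some [] else none)
    else
      match fuel with
      | 0 => none
      | f' + 1 =>
        if remaining < k ^ (k - depth).toNat then none
        else findA_loop k factors f' remaining depth ((PySem.Dict.mk factors).getD remaining [])
  termination_by (fuel, 0)

  -- the 'for a in factors.get(remaining, [])' loop of A's helper
  def findA_loop (k : Int) (factors : List (Int × List Int)) (f' : Nat) (remaining : Int) (depth : Int) (l : List Int) : Option (List Int) :=
    match l with
    | [] => none
    | a :: rest =>
      if a < k then findA_loop k factors f' remaining depth rest
      else if ¬ (PySem.Int.mod remaining a = 0) then findA_loop k factors f' remaining depth rest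
      else
        match findA_helper k factors f' (PySem.Int.floordiv remaining a) (depth + 1) with
        | some r => some (a :: r)
        | none => findA_loop k factors f' remaining depth rest
  termination_by (f', l.length + 1)
end

def find_multiset (n : Int) (k : Int) (factors : List (Int × List Int)) : Option (List Int) :=
  findA_helper k factors k.toNat n 0

-- ===== PORT B =====
-- Source B's frames are (remaining, depth, path); as in port A, depth is carried as f = k - depth.
-- The python pushes the eligible divisors in reversed order onto the end of the list;
-- with the head of the Lean list as the top of the stack this is exactly prepending
-- the eligible divisors in their original order.
def findB_children (k : Int) (factors : List (Int × List Int)) (rem : Int) (f' : Nat) (path : List Int) : List (Int × Nat × List Int) :=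
  (((PySem.Dict.mk factors).getD rem []).filter (fun a => decide (k ≤ a) && decide (PySem.Int.mod rem a = 0))).map
    (fun a => (PySem.Int.floordiv rem a, f', path ++ [a]))

-- termination helpers for the stack machine (cited by decreasing_by)
def pvValLenSum (factors : List (Int × List Int)) : Nat := (factors.map (fun p => p.2.length)).sum

def pvStackWeight (factors : List (Int × List Int)) (stack : List (Int × Nat × List Int)) : Nat :=
  (stack.map (fun fr => (pvValLenSum factors + 1) ^ fr.2.1)).sum

theorem pvGetD_len_le (factors : List (Int × List Int)) (rem : Int) :
    ((PySem.Dict.mk factors).getD rem []).length ≤ pvValLenSum factors := by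
  induction factors with
  | nil => simp [PySem.Dict.getD, PySem.Dict.get?, pvValLenSum]
  | cons p rest ih =>
    obtain ⟨key, v⟩ := p
    rw [PySem.Dict.getD_eq_get?_getD, PySem.Dict.get?_mk_cons]
    by_cases h : key == rem
    · simp [h, pvValLenSum]
    · simp only [h, Bool.false_eq_true, ite_false]
      rw [← PySem.Dict.getD_eq_get?_getD]
      calc ((PySem.Dict.mk rest).getD rem []).length ≤ pvValLenSum rest := ih
        _ ≤ pvValLenSum ((key, v) :: rest) := by simp [pvValLenSum]

theorem pvChildren_le (k : Int) (factors : List (Int × List Int)) (rem : Int) (f' : Nat) (path : List Int) :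
    (findB_children k factors rem f' path).length ≤ pvValLenSum factors := by
  unfold findB_children
  calc _ = ((((PySem.Dict.mk factors).getD rem []).filter _)).length := List.length_map ..
    _ ≤ (((PySem.Dict.mk factors).getD rem [])).length := List.length_filter_le ..
    _ ≤ pvValLenSum factors := pvGetD_len_le factors rem

theorem pvWeight_children (factors : List (Int × List Int)) (children : List (Int × Nat × List Int)) (f' : Nat)
    (h : ∀ fr ∈ children, fr.2.1 = f') :
    pvStackWeight factors children = children.length * (pvValLenSum factors + 1) ^ f' := by
  induction children with
  | nil => simp [pvStackWeight]
  | cons c cs ih =>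
    have hc := h c (List.mem_cons_self ..)
    simp only [pvStackWeight, List.map_cons, List.sum_cons, List.length_cons] at *
    rw [hc, ih (fun fr hf => h fr (List.mem_cons_of_mem _ hf))]
    ring

def findB_run (k : Int) (factors : List (Int × List Int)) (stack : List (Int × Nat × List Int)) : Option (List Int) :=
  match stack with
  | [] => none
  | (rem, f, path) :: rest =>
    match f with
    | 0 => if rem = 1 then some path else findB_run k factors rest
    | f' + 1 =>
      if rem < k ^ (f' + 1) then findB_run k factors rest
      else findB_run k factors (findB_children k factors rem f' path ++ rest)
termination_by pvStackWeight factors stack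
decreasing_by
  · simp only [pvStackWeight, List.map_cons, List.sum_cons]
    have : 0 < (pvValLenSum factors + 1) ^ (0 : Nat) :=
      Nat.pow_pos (show 0 < pvValLenSum factors + 1 by omega)
    omega
  · simp only [pvStackWeight, List.map_cons, List.sum_cons, Nat.succ_eq_add_one]
    have : 0 < (pvValLenSum factors + 1) ^ (f' + 1) :=
      Nat.pow_pos (show 0 < pvValLenSum factors + 1 by omega)
    omega
  · simp only [pvStackWeight, List.map_append, List.sum_append, List.map_cons, List.sum_cons]
    have h1 : pvStackWeight factors (findB_children k factors rem f' path)
        = (findB_children k factors rem f' path).length * (pvValLenSum factors + 1) ^ f' := by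
      apply pvWeight_children
      intro fr hf
      unfold findB_children at hf
      obtain ⟨a, _, rfl⟩ := List.mem_map.mp hf
      rfl
    have h2 := pvChildren_le k factors rem f' path
    have h3 : (findB_children k factors rem f' path).length * (pvValLenSum factors + 1) ^ f'
        < (pvValLenSum factors + 1) ^ (f' + 1) := by
      calc _ ≤ pvValLenSum factors * (pvValLenSum factors + 1) ^ f' :=
              Nat.mul_le_mul_right _ h2
        _ < (pvValLenSum factors + 1) * (pvValLenSum factors + 1) ^ f' :=
              (Nat.mul_lt_mul_right (Nat.pow_pos (by omega))).mpr (by omega)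
        _ = (pvValLenSum factors + 1) ^ (f' + 1) := by ring
    simp only [pvStackWeight] at h1
    have h4 : (pvValLenSum factors + 1) ^ f'.succ = (pvValLenSum factors + 1) ^ (f' + 1) := rfl
    omega

def find_multiset_alt (n : Int) (k : Int) (factors : List (Int × List Int)) : Option (List Int) :=
  findB_run k factors [(n, k.toNat, [])]

-- ===== PRECONDITION & SPEC =====
-- Pre_ restricts to the function's natural domain k ≥ 0 ("find k factors"): for k < 0 the
-- Python prune compares remaining against a FLOAT (negative-exponent power), can raise
-- ZeroDivisionError when 0 occurs among the listed divisors, and can recurse without bound,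
-- so A's k < 0 behaviour is an accident of negative exponents and is excluded.
def Pre_find_multiset (n : Int) (k : Int) (factors : List (Int × List Int)) : Prop := 0 ≤ k
instance (n : Int) (k : Int) (factors : List (Int × List Int)) : Decidable (Pre_find_multiset n k factors) := by unfold Pre_find_multiset; infer_instance

def pvWitness_find_multiset : Int × Int × (List (Int × List Int)) := (12, 2, [(12, [3, 4, 6]), (4, [2, 4]), (3, [3]), (6, [2, 3, 6])])

def Spec_find_multiset (n : Int) (k : Int) (factors : List (Int × List Int)) (out : Option (List Int)) : Prop := out = find_multiset_alt n k factors
instance (n : Int) (k : Int) (factors : List (Int × List Int)) (out : Option (List Int)) : Decidable (Spec_find_multiset n k factors out) := by unfold Spec_find_multiset; infer_instance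

-- ===== CLAIM (what is proved, stated in full; the proofs are below) =====
def Claim_equal_find_multiset : Prop := ∀ (n : Int) (k : Int) (factors : List (Int × List Int)), Dom_find_multiset n k factors → Pre_find_multiset n k factors → Spec_find_multiset n k factors (find_multiset n k factors)

-- ===== LEMMAS AND PROOFS =====

-- the value of one DFS frame: what A's helper returns from that state, with the path prefixed
def pvFrameRes (k : Int) (factors : List (Int × List Int)) (fr : Int × Nat × List Int) : Option (List Int) :=
  (findA_helper k factors fr.2.1 fr.1 (k - fr.2.1)).map (fr.2.2 ++ ·)

theorem pvLoop_eq_findSome (k : Int) (factors : List (Int × List Int)) (f' : Nat) (rem : Int) (depth : Int) (path : List Int)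
    (hd : depth + 1 = k - (f' : Int)) :
    ∀ l : List Int,
      ((l.filter (fun a => decide (k ≤ a) && decide (PySem.Int.mod rem a = 0))).map
          (fun a => ((PySem.Int.floordiv rem a : Int), f', path ++ [a]))).findSome? (pvFrameRes k factors)
      = (findA_loop k factors f' rem depth l).map (path ++ ·) := by
  intro l
  induction l with
  | nil => simp [findA_loop]
  | cons a rest ih =>
    rw [List.filter_cons, findA_loop]
    by_cases h1 : a < k
    · have hq : (decide (k ≤ a) && decide (PySem.Int.mod rem a = 0)) = false := by
        simp only [Bool.and_eq_false_iff, decide_eq_false_iff_not]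
        left; omega
      simp only [hq, Bool.false_eq_true, ite_false, if_pos h1]
      exact ih
    · by_cases h2 : PySem.Int.mod rem a = 0
      · have hq : (decide (k ≤ a) && decide (PySem.Int.mod rem a = 0)) = true := by
          simp only [Bool.and_eq_true, decide_eq_true_eq]
          exact ⟨by omega, h2⟩
        simp only [hq, ite_true, List.map_cons, if_neg h1, h2,
          not_true_eq_false, ite_false]
        have hka : k ≤ a := by omega
        rw [show depth + 1 = k - (f' : Int) from hd]
        cases hres : findA_helper k factors f' (PySem.Int.floordiv rem a) (k - (f' : Int)) with
        | none => simp [pvFrameRes, hres, ih, hka, h2]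
        | some r => simp [pvFrameRes, hres, hka, h2]
      · have hq : (decide (k ≤ a) && decide (PySem.Int.mod rem a = 0)) = false := by
          simp only [Bool.and_eq_false_iff, decide_eq_false_iff_not]
          right; exact h2
        simp only [hq, Bool.false_eq_true, ite_false, if_neg h1]
        rw [if_pos h2]
        exact ih

-- how findA_helper unfolds at a frame with positive fuel f' + 1 and depth k - (f' + 1)
theorem pvHelper_succ (k : Int) (factors : List (Int × List Int)) (f' : Nat) (rem : Int) :
    findA_helper k factors (f' + 1) rem (k - ((f' : Int) + 1))
      = if rem < k ^ (f' + 1) then none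
        else findA_loop k factors f' rem (k - ((f' : Int) + 1)) ((PySem.Dict.mk factors).getD rem []) := by
  rw [findA_helper]
  have hne : ¬ (k - ((f' : Int) + 1) = k) := by omega
  have hexp : (k - (k - ((f' : Int) + 1))).toNat = f' + 1 := by omega
  simp only [hne, ite_false, hexp, if_neg]

theorem pvRun_eq_findSome (k : Int) (factors : List (Int × List Int)) (stack : List (Int × Nat × List Int)) :
    findB_run k factors stack = stack.findSome? (pvFrameRes k factors) := by
  induction stack using findB_run.induct k factors with
  | case1 => simp [findB_run]
  | case2 path rest =>
    rw [findB_run]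
    simp [pvFrameRes, findA_helper]
  | case3 rem path rest h ih =>
    rw [findB_run]
    simp only [if_neg h, List.findSome?_cons]
    rw [ih]
    simp [pvFrameRes, findA_helper, h]
  | case4 rem path rest f' h ih =>
    rw [findB_run]
    simp only [if_pos h, List.findSome?_cons]
    rw [ih]
    have : pvFrameRes k factors (rem, f' + 1, path) = none := by
      simp only [pvFrameRes, Nat.cast_add, Nat.cast_one]
      rw [pvHelper_succ]
      simp [h]
    simp [this]
  | case5 rem path rest f' h ih =>
    rw [findB_run]
    simp only [if_neg h]
    rw [ih, List.findSome?_append]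
    have hhead : (findB_children k factors rem f' path).findSome? (pvFrameRes k factors)
        = pvFrameRes k factors (rem, f' + 1, path) := by
      unfold findB_children
      rw [pvLoop_eq_findSome k factors f' rem (k - ((f' : Int) + 1)) path (by omega)]
      simp only [pvFrameRes, Nat.cast_add, Nat.cast_one]
      rw [pvHelper_succ]
      simp [h]
    rw [hhead, List.findSome?_cons]
    cases pvFrameRes k factors (rem, f' + 1, path) <;> simp

-- ===== VERDICT (by name: the statement is the Claim_ definition above) =====
theorem find_multiset_spec : Claim_equal_find_multiset := by
  intro n k factors _hd hp
  unfold Spec_find_multiset find_multiset find_multiset_alt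
  rw [pvRun_eq_findSome]
  rw [List.findSome?_cons]
  have hdep : k - (k.toNat : Int) = 0 := by
    have := Int.toNat_of_nonneg hp
    omega
  simp only [pvFrameRes, hdep]
  cases findA_helper k factors k.toNat n 0 <;> simp
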